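-- pv_equiv track=rewrite | github.com/lilaspourpre/newsexplorer | pyqt/NerAndClusering/EN_ner.py | formPersonalNames
-- ===== SOURCE A (Python) =====
-- def formPersonalNames(wordlistcount, checkedWords, checkedIndexes):
--     #самое длинное если три и в нормальной форме, либо самое частоное если 1 - для кластера
--     stoplist = [checkedIndexes[0]] #создаем кратковременный список, сразу кладем первый элемент id
--     wordlist = [wordlistcount[checkedIndexes[0]]] #и кладем само слово тоже
--     for i in checkedIndexes[1::]: #начинаем проверку с первого элемента
--         if i == stoplist[len(stoplist)-1]+1 or len(stoplist)==0: #если следующий идет прямо за ним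
--             stoplist.append(i) #то мы продолжаем добавление
--             wordlist.append(wordlistcount[i])
--         else: #если нет
--             checkedWords.append(" ".join(wordlist)) #то мы добавляем слова в список
--             stoplist = [i] #очищаем списки
--             wordlist = [wordlistcount[i]]
--     checkedWords.append(" ".join(wordlist)) #после прохождения списка добавляем остаток
--     return checkedWords
-- ===== SOURCE B (Python) =====
-- def formPersonalNames(wordlistcount, checkedWords, checkedIndexes):
--     n = len(checkedIndexes)
--     bounds = [0] + [k for k in range(1, n) if checkedIndexes[k] != checkedIndexes[k - 1] + 1] + [n]
--     for start, end in zip(bounds, bounds[1:]):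
--         checkedWords.append(" ".join(wordlistcount[i] for i in checkedIndexes[start:end]))
--     return checkedWords
-- ===== Notes on version B (the rewrite author's own statement) =====
-- stated objective: alternative
-- what changed: Replaces A's single stateful pass (accumulating stoplist/wordlist run state) by two staged passes: first compute the list of break positions where consecutiveness fails, then slice checkedIndexes between consecutive bounds and join each slice.
import Mathlib
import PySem

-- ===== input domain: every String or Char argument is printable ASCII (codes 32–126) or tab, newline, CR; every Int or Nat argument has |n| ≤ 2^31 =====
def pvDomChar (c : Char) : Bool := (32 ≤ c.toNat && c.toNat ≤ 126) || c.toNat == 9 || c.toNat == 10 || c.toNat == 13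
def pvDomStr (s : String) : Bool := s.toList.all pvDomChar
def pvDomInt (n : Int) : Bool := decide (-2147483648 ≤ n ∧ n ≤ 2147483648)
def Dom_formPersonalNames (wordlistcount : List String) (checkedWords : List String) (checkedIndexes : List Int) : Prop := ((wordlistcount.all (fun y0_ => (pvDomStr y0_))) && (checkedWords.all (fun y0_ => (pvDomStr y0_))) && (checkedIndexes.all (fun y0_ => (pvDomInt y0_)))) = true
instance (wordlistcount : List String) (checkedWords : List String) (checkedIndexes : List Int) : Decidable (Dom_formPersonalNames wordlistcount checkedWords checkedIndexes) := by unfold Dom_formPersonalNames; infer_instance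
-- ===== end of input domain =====

-- B replaces A's single stateful run-accumulating pass by two staged passes: first
-- compute all break positions (indices where consecutiveness fails), then slice the
-- index list between consecutive bounds and join each slice; equivalence is about the
-- RETURN value (both Pythons also append the same strings to checkedWords in place).

-- ===== PORT A =====
-- the for-loop of A, state (stoplist, wordlist, checkedWords), recursing on the remaining indices
def pvFormLoop (wordlistcount : List String) (stoplist : List Int) (wordlist : List String)
    (checkedWords : List String) : List Int → List String
  | [] => checkedWords ++ [PySem.Str.join " " wordlist]
  | i :: rest =>
      if i = (PySem.List.pyGet? stoplist ((stoplist.length : Int) - 1)).getD 0 + 1 ∨ stoplist.length = 0 then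
        pvFormLoop wordlistcount (stoplist ++ [i])
          (wordlist ++ [(PySem.List.pyGet? wordlistcount i).getD ""]) checkedWords rest
      else
        pvFormLoop wordlistcount [i] [(PySem.List.pyGet? wordlistcount i).getD ""]
          (checkedWords ++ [PySem.Str.join " " wordlist]) rest

def formPersonalNames (wordlistcount : List String) (checkedWords : List String) (checkedIndexes : List Int) : List String :=
  -- checkedIndexes[0] and wordlistcount[checkedIndexes[0]]; Pre_ guarantees the lookups succeed (getD is never hit inside Pre_)
  let i0 := (PySem.List.pyGet? checkedIndexes 0).getD 0
  pvFormLoop wordlistcount [i0] [(PySem.List.pyGet? wordlistcount i0).getD ""] checkedWords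
    (PySem.List.slice checkedIndexes (some 1) none)

-- ===== PORT B =====
-- Source B: bounds = [0] + [k for k in range(1, n) if ci[k] != ci[k-1]+1] + [n],
-- then one joined name per adjacent pair of bounds (zip(bounds, bounds[1:]))
def formPersonalNames_alt (wordlistcount : List String) (checkedWords : List String) (checkedIndexes : List Int) : List String :=
  let n : Int := checkedIndexes.length
  let bounds : List Int :=
    0 :: (PySem.List.pyRange 1 n 1).filter
        (fun k => (PySem.List.pyGet? checkedIndexes k).getD 0 ≠
                  (PySem.List.pyGet? checkedIndexes (k - 1)).getD 0 + 1) ++ [n]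
  (bounds.zip (bounds.drop 1)).foldl
    (fun acc p =>
      acc ++ [PySem.Str.join " " ((PySem.List.slice checkedIndexes (some p.1) (some p.2)).map
        (fun i => (PySem.List.pyGet? wordlistcount i).getD ""))])
    checkedWords

-- ===== PRECONDITION & SPEC =====
-- Pre_ excludes exactly the inputs where Python A raises: empty checkedIndexes (IndexError on
-- checkedIndexes[0]) and indices outside Python's range for wordlistcount (IndexError on wordlistcount[i]).
def Pre_formPersonalNames (wordlistcount : List String) (checkedWords : List String) (checkedIndexes : List Int) : Prop :=
  checkedIndexes ≠ [] ∧ ∀ i ∈ checkedIndexes, PySem.Raise.InRange wordlistcount.length i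
instance (wordlistcount : List String) (checkedWords : List String) (checkedIndexes : List Int) : Decidable (Pre_formPersonalNames wordlistcount checkedWords checkedIndexes) := by unfold Pre_formPersonalNames; infer_instance

def pvWitness_formPersonalNames : List String × List String × List Int := (["Ada", "Lovelace", "X"], ["seen"], [0, 1])

def Spec_formPersonalNames (wordlistcount : List String) (checkedWords : List String) (checkedIndexes : List Int) (out : List String) : Prop := out = formPersonalNames_alt wordlistcount checkedWords checkedIndexes
instance (wordlistcount : List String) (checkedWords : List String) (checkedIndexes : List Int) (out : List String) : Decidable (Spec_formPersonalNames wordlistcount checkedWords checkedIndexes out) := by unfold Spec_formPersonalNames; infer_instance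

-- ===== CLAIM (what is proved, stated in full; the proofs are below) =====
def Claim_equal_formPersonalNames : Prop := ∀ (wordlistcount : List String) (checkedWords : List String) (checkedIndexes : List Int), Dom_formPersonalNames wordlistcount checkedWords checkedIndexes → Pre_formPersonalNames wordlistcount checkedWords checkedIndexes → Spec_formPersonalNames wordlistcount checkedWords checkedIndexes (formPersonalNames wordlistcount checkedWords checkedIndexes)

-- ===== LEMMAS AND PROOFS =====

-- the word fetched for index i (shared shape of both ports' lookups)
def pvWordAt (wordlistcount : List String) (i : Int) : String :=
  (PySem.List.pyGet? wordlistcount i).getD ""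

-- the joined name of one group of indices
def pvJoinG (wordlistcount : List String) (g : List Int) : String :=
  PySem.Str.join " " (g.map (pvWordAt wordlistcount))

-- A's loop, abstracted: keep only the LAST element of stoplist (it is all A ever reads)
def pvRuns (wordlistcount : List String) (v : Int) (wordlist : List String) : List Int → List String
  | [] => [PySem.Str.join " " wordlist]
  | i :: rest =>
      if i = v + 1 then pvRuns wordlistcount i (wordlist ++ [pvWordAt wordlistcount i]) rest
      else PySem.Str.join " " wordlist :: pvRuns wordlistcount i [pvWordAt wordlistcount i] rest

-- the maximal consecutive runs of an index list (reference decomposition both sides meet at)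
def pvRunsOf : List Int → List (List Int)
  | [] => []
  | [v] => [[v]]
  | v :: u :: t =>
      match pvRunsOf (u :: t) with
      | [] => [[v]]
      | g :: gs => if u = v + 1 then (v :: g) :: gs else [v] :: g :: gs

-- the break positions (1-based) of an index list, recursively
def pvCutsOf : List Int → List Nat
  | [] => []
  | [_] => []
  | v :: u :: t => (if u = v + 1 then [] else [1]) ++ (pvCutsOf (u :: t)).map (· + 1)

-- the segments of l cut at positions cs, starting from position s
def pvSegsOf (l : List Int) : Nat → List Nat → List (List Int)
  | s, [] => [(l.drop s).take (l.length - s)]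
  | s, c :: cs => (l.drop s).take (c - s) :: pvSegsOf l c cs

-- join the groups, with a pending word prefix `ws` merged into the first group
def pvMapJoinPre (wordlistcount : List String) (ws : List String) : List (List Int) → List String
  | [] => [PySem.Str.join " " ws]
  | g :: gs => PySem.Str.join " " (ws ++ g.map (pvWordAt wordlistcount)) :: gs.map (pvJoinG wordlistcount)

theorem pvRunsOf_cons_ne_nil (v : Int) (l : List Int) : pvRunsOf (v :: l) ≠ [] := by
  cases l with
  | nil => simp [pvRunsOf]
  | cons u t =>
      rw [pvRunsOf]
      cases pvRunsOf (u :: t) with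
      | nil => simp
      | cons g gs => dsimp only; split <;> simp

theorem pvFormLoop_eq_pvRuns (wordlistcount : List String) :
    ∀ (rest : List Int) (s : List Int) (v : Int) (wl cw : List String),
    pvFormLoop wordlistcount (s ++ [v]) wl cw rest = cw ++ pvRuns wordlistcount v wl rest := by
  intro rest
  induction rest with
  | nil => intro s v wl cw; simp [pvFormLoop, pvRuns]
  | cons i r ih =>
      intro s v wl cw
      have hlen : ((s ++ [v]).length : Int) - 1 = (s.length : Int) := by simp
      have hget : PySem.List.pyGet? (s ++ [v]) (((s ++ [v]).length : Int) - 1) = some v := by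
        rw [hlen]; exact PySem.List.pyGet?_append_length s [] v
      rw [pvFormLoop, pvRuns, hget]
      by_cases hc : i = v + 1
      · rw [if_pos (Or.inl (by simpa using hc)), if_pos hc]
        have := ih (s ++ [v]) i (wl ++ [pvWordAt wordlistcount i]) cw
        simpa [pvWordAt, List.append_assoc] using this
      · rw [if_neg (by simp [hc]), if_neg hc]
        have := ih [] i [pvWordAt wordlistcount i] (cw ++ [PySem.Str.join " " wl])
        simp only [List.nil_append] at this
        simp only [pvWordAt] at this
        rw [this]
        simp
        rfl

-- A side: pvRuns produces exactly the joined runs, with the pending words ws merged in front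
theorem pvMapJoinPre_runsOf (wordlistcount : List String) :
    ∀ (rest : List Int) (v : Int) (ws : List String),
    pvMapJoinPre wordlistcount ws (pvRunsOf (v :: rest)) =
      pvRuns wordlistcount v (ws ++ [pvWordAt wordlistcount v]) rest := by
  intro rest
  induction rest with
  | nil => intro v ws; simp [pvRunsOf, pvMapJoinPre, pvRuns]
  | cons i r ih =>
      intro v ws
      cases hg : pvRunsOf (i :: r) with
      | nil => exact absurd hg (pvRunsOf_cons_ne_nil _ _)
      | cons g gs =>
          have hrw : pvRunsOf (v :: i :: r) =
              if i = v + 1 then (v :: g) :: gs else [v] :: g :: gs := by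
            rw [pvRunsOf, hg]
          rw [hrw]
          by_cases hc : i = v + 1
          · rw [if_pos hc]
            have step : pvMapJoinPre wordlistcount ws ((v :: g) :: gs) =
                pvMapJoinPre wordlistcount (ws ++ [pvWordAt wordlistcount v]) (g :: gs) := by
              simp [pvMapJoinPre, List.append_assoc]
            rw [step, ← hg, ih]
            simp [pvRuns, hc]
          · rw [if_neg hc]
            have tailmap : pvMapJoinPre wordlistcount [] (g :: gs) =
                (g :: gs).map (pvJoinG wordlistcount) := by
              simp [pvMapJoinPre, pvJoinG]
            have htail := ih i ([] : List String)
            rw [hg, tailmap] at htail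
            simp only [List.nil_append] at htail
            rw [pvRuns, if_neg hc]
            simp [pvMapJoinPre, htail]

-- B side, step 1: segments shift under cons
theorem pvSegsOf_shift (v : Int) (l : List Int) :
    ∀ (cs : List Nat) (s : Nat),
    pvSegsOf (v :: l) (s + 1) (cs.map (· + 1)) = pvSegsOf l s cs := by
  intro cs
  induction cs with
  | nil => intro s; simp [pvSegsOf]
  | cons c cs ih =>
      intro s
      simp only [List.map_cons, pvSegsOf, List.drop_succ_cons]
      rw [show c + 1 - (s + 1) = c - s by omega]
      rw [ih c]

theorem pvSegsOf_head (v : Int) (l : List Int) (cs : List Nat) :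
    pvSegsOf (v :: l) 0 (cs.map (· + 1)) = (pvSegsOf l 0 cs).modifyHead (v :: ·) := by
  cases cs with
  | nil => simp [pvSegsOf, List.take_of_length_le]
  | cons c cs =>
      simp only [List.map_cons, pvSegsOf, List.drop_zero, List.modifyHead]
      have hs := pvSegsOf_shift v l cs c
      simp only [Nat.sub_zero, List.take_succ_cons, hs]

-- B side, step 2: cutting at the break positions yields exactly the runs
theorem pvSegsOf_cutsOf (l : List Int) (h : l ≠ []) :
    pvSegsOf l 0 (pvCutsOf l) = pvRunsOf l := by
  induction l with
  | nil => exact absurd rfl h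
  | cons v t ih =>
      cases t with
      | nil => simp [pvCutsOf, pvSegsOf, pvRunsOf]
      | cons u t' =>
          have ih' := ih (by simp)
          rw [pvCutsOf, pvRunsOf]
          cases hg : pvRunsOf (u :: t') with
          | nil => exact absurd hg (pvRunsOf_cons_ne_nil _ _)
          | cons g gs =>
              rw [hg] at ih'
              by_cases hc : u = v + 1
              · rw [if_pos hc]
                simp only [List.nil_append]
                rw [pvSegsOf_head, ih']
                simp [List.modifyHead, hc]
              · rw [if_neg hc]
                simp only [List.cons_append, List.nil_append]
                rw [pvSegsOf]
                have : pvSegsOf (v :: u :: t') 1 ((pvCutsOf (u :: t')).map (· + 1)) =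
                    pvSegsOf (u :: t') 0 (pvCutsOf (u :: t')) := pvSegsOf_shift v (u :: t') (pvCutsOf (u :: t')) 0
                rw [this, ih']
                simp [hc]

-- B side, step 3: the filtered range of break positions equals pvCutsOf (as Ints)
theorem pvFilter_eq_cutsOf (ci : List Int) :
    (PySem.List.pyRange 1 (ci.length : Int) 1).filter
        (fun k => (PySem.List.pyGet? ci k).getD 0 ≠ (PySem.List.pyGet? ci (k - 1)).getD 0 + 1) =
      (pvCutsOf ci).map (Nat.cast : Nat → Int) := by
  have key : ∀ (l : List Int),
      ((List.range (l.length - 1)).filter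
        (fun k => decide (l[k+1]?.getD 0 ≠ l[k]?.getD 0 + 1))).map (fun k => k + 1) = pvCutsOf l := by
    intro l
    induction l with
    | nil => simp [pvCutsOf]
    | cons v t ih =>
        cases t with
        | nil => simp [pvCutsOf]
        | cons u t' =>
            rw [pvCutsOf]
            have hlen : (v :: u :: t').length - 1 = ((u :: t').length - 1) + 1 := by simp
            rw [hlen, List.range_succ_eq_map, List.filter_cons, List.filter_map]
            have hpred : (fun k => decide ((v :: u :: t')[k+1]?.getD 0 ≠ (v :: u :: t')[k]?.getD 0 + 1)) ∘ Nat.succ =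
                fun k => decide ((u :: t')[k+1]?.getD 0 ≠ (u :: t')[k]?.getD 0 + 1) := by
              funext k; simp
            rw [hpred]
            by_cases hc : u = v + 1
            · rw [if_pos hc]
              have h0 : (decide ((v :: u :: t')[0+1]?.getD 0 ≠ (v :: u :: t')[0]?.getD 0 + 1)) = false := by
                simp [hc]
              rw [h0, if_neg (by simp), List.map_map, ← ih, List.map_map]
              simp only [List.nil_append]
            · rw [if_neg hc]
              have h0 : (decide ((v :: u :: t')[0+1]?.getD 0 ≠ (v :: u :: t')[0]?.getD 0 + 1)) = true := by
                simp [hc]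
              rw [h0, if_pos rfl, List.map_cons, List.map_map, ← ih, List.map_map]
              simp only [List.cons_append, List.nil_append]
  rw [PySem.List.pyRange_one]
  have hN : ((ci.length : Int) - 1).toNat = ci.length - 1 := by omega
  rw [hN, List.filter_map]
  have hpred2 : ((fun k => decide ((PySem.List.pyGet? ci k).getD 0 ≠ (PySem.List.pyGet? ci (k - 1)).getD 0 + 1)) ∘
      (fun k : Nat => (1 : Int) + k)) =
      fun k : Nat => decide (ci[k+1]?.getD 0 ≠ ci[k]?.getD 0 + 1) := by
    funext k
    have h1 : (1 : Int) + (k : Int) = ((k + 1 : Nat) : Int) := by push_cast; ring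
    have h2 : ((k + 1 : Nat) : Int) - 1 = ((k : Nat) : Int) := by push_cast; ring
    simp only [Function.comp, h1, h2, PySem.List.pyGet?_natCast]
  rw [hpred2, ← key ci, List.map_map]
  congr 1
  funext k
  simp only [Function.comp_apply]
  push_cast
  ring

-- B side, step 4: the zip of consecutive bounds produces the joined segments
theorem pvZip_segs (wordlistcount : List String) (ci : List Int) :
    ∀ (cs : List Nat) (s : Nat),
    ((((s : Int)) :: (cs.map (Nat.cast : Nat → Int) ++ [(ci.length : Int)])).zip
        (cs.map (Nat.cast : Nat → Int) ++ [(ci.length : Int)])).map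
      (fun p => PySem.Str.join " " ((PySem.List.slice ci (some p.1) (some p.2)).map
        (fun i => (PySem.List.pyGet? wordlistcount i).getD ""))) =
      (pvSegsOf ci s cs).map (pvJoinG wordlistcount) := by
  intro cs
  induction cs with
  | nil =>
      intro s
      simp only [List.map_nil, List.nil_append, List.zip_cons_cons, List.zip_nil_right, List.map_cons,
        List.map_nil, pvSegsOf]
      rw [PySem.List.slice_natCast]
      rfl
  | cons c cs ih =>
      intro s
      simp only [List.map_cons, List.cons_append, List.zip_cons_cons, List.map_cons]
      rw [PySem.List.slice_natCast]
      rw [pvSegsOf, List.map_cons]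
      congr 1
      exact ih c

-- B bridge: the port of B computes checkedWords ++ the joined segments at the break positions
theorem formPersonalNames_alt_eq (wordlistcount checkedWords : List String) (ci : List Int) :
    formPersonalNames_alt wordlistcount checkedWords ci =
      checkedWords ++ (pvSegsOf ci 0 (pvCutsOf ci)).map (pvJoinG wordlistcount) := by
  unfold formPersonalNames_alt
  dsimp only
  rw [pvFilter_eq_cutsOf, PySem.List.foldl_append_singleton_eq_map]
  have := pvZip_segs wordlistcount ci (pvCutsOf ci) 0
  simp only [Nat.cast_zero] at this
  simp only [List.cons_append, List.drop_one, List.tail_cons]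
  rw [this]

-- ===== VERDICT (by name: the statement is the Claim_ definition above) =====
theorem formPersonalNames_spec : Claim_equal_formPersonalNames := by
  intro w cw ci _hdom hpre
  obtain ⟨hne, _⟩ := hpre
  cases ci with
  | nil => exact absurd rfl hne
  | cons v rest =>
      unfold Spec_formPersonalNames formPersonalNames
      rw [PySem.List.slice_from_one]
      simp only [PySem.List.pyGet?_zero_cons, Option.getD_some, List.tail_cons]
      have hA := pvFormLoop_eq_pvRuns w rest [] v [pvWordAt w v] cw
      simp only [List.nil_append, pvWordAt] at hA
      rw [hA]
      rw [formPersonalNames_alt_eq, pvSegsOf_cutsOf (v :: rest) (by simp)]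
      cases hg : pvRunsOf (v :: rest) with
      | nil => exact absurd hg (pvRunsOf_cons_ne_nil _ _)
      | cons g gs =>
          have hB := pvMapJoinPre_runsOf w rest v ([] : List String)
          rw [hg] at hB
          simp only [pvMapJoinPre, List.nil_append, pvWordAt] at hB
          rw [← hB]
          simp [pvJoinG]
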